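-- pv_equiv track=rewrite | github.com/joshuarocksolid/ChoreBoyCodeStudio | app/editors/quick_open.py | _score_positions
-- ===== SOURCE A (Python) =====
-- from typing import List, Optional, Tuple
--
-- _BOUNDARY_CHARS = frozenset("/_.-")
--
-- def _is_boundary(path: str, idx: int) -> bool:
--     if idx == 0:
--         return True
--     prev = path[idx - 1]
--     if prev in _BOUNDARY_CHARS:
--         return True
--     cur = path[idx]
--     if prev.islower() and cur.isupper():
--         return True
--     return False
--
-- def _score_positions(path_lower: str, path_original: str, positions: List[int], qlen: int) -> int:
--     score = 0
--     file_name_start = path_lower.rfind("/") + 1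
--
--     consecutive_bonus = 0
--     for i, pos in enumerate(positions):
--         if _is_boundary(path_original, pos):
--             score += 12
--         if pos >= file_name_start:
--             score += 5
--         if i > 0 and pos == positions[i - 1] + 1:
--             consecutive_bonus += 8
--             score += consecutive_bonus
--         else:
--             consecutive_bonus = 0
--
--     file_name = path_lower[file_name_start:]
--     if file_name.startswith(path_lower[positions[0]:positions[0] + 1] if positions else ""):
--         first_in_filename = all(p >= file_name_start for p in positions[:min(3, len(positions))])
--         if first_in_filename:
--             score += 30
--
--     score -= len(path_lower)
--     score += qlen * 3
--
--     return score
-- ===== SOURCE B (Python) =====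
-- from typing import List
--
-- _BOUNDARY_CHARS = frozenset("/_.-")
--
--
-- def _is_boundary(path: str, idx: int) -> bool:
--     if idx == 0:
--         return True
--     prev = path[idx - 1]
--     if prev in _BOUNDARY_CHARS:
--         return True
--     cur = path[idx]
--     if prev.islower() and cur.isupper():
--         return True
--     return False
--
--
-- def _score_positions(path_lower: str, path_original: str, positions: List[int], qlen: int) -> int:
--     file_name_start = path_lower.rfind("/") + 1
--
--     first = path_lower[positions[0]:positions[0] + 1] if positions else ""
--     score = 30 if (path_lower[file_name_start:].startswith(first)
--                    and all(p >= file_name_start for p in positions[:3])) else 0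
--
--     score += sum((12 if _is_boundary(path_original, p) else 0)
--                  + (5 if p >= file_name_start else 0) for p in positions)
--
--     # Run bonus by pair counting: 8 points for every pair (j, i), j < i, whose
--     # span positions[j..i] is a run of consecutive integers; counted with a
--     # backward scan from each index instead of a running-bonus accumulator.
--     pairs = 0
--     for i in range(len(positions)):
--         j = i
--         while j > 0 and positions[j] == positions[j - 1] + 1:
--             pairs += 1
--             j -= 1
--     score += 8 * pairs
--
--     return score - len(path_lower) + qlen * 3
-- ===== Notes on version B (the rewrite author's own statement) =====
-- stated objective: alternative
-- what changed: Replaces A's fused stateful loop with its incremental consecutive_bonus accumulator by pair counting: the run bonus is 8 per pair (j,i), j<i, whose span positions[j..i] is consecutive, found by a backward while-scan from each index (quadratic on long runs); boundary/region points become a single weight sum and the +30 bonus is computed up front.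
import Mathlib
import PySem

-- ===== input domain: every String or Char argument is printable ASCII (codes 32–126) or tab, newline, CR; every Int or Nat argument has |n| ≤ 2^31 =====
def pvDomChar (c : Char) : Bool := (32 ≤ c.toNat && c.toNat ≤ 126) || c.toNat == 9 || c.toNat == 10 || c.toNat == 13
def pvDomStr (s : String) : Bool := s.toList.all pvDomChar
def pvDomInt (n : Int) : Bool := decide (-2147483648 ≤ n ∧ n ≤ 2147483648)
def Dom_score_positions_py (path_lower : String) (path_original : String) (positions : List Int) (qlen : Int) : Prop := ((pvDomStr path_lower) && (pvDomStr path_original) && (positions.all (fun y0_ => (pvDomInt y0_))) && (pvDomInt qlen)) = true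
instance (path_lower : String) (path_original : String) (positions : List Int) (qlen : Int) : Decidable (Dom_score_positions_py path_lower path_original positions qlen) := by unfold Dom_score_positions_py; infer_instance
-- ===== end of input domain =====

-- B replaces A's fused stateful loop (incremental consecutive_bonus accumulator) by pair counting:
-- the run bonus is 8 per pair (j,i), j<i, with positions[j..i] consecutive, found by a backward
-- while-scan from each index; objective: alternative (different algorithm, quadratic on long runs).

-- ===== PORT A =====
-- shared helper: Python _is_boundary (used by both Source A and Source B); `none` branches are where
-- Python raises IndexError — excluded by Pre_score_positions_py
def isBoundaryChar (c : Char) : Bool := c == '/' || c == '_' || c == '.' || c == '-'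

def isBoundary (path : String) (idx : Int) : Bool :=
  if idx = 0 then true
  else
    match PySem.Str.pyGet? path (idx - 1) with
    | none => false  -- IndexError in Python; outside Pre_
    | some prev =>
      if isBoundaryChar prev then true
      else
        match PySem.Str.pyGet? path idx with
        | none => false  -- IndexError in Python; outside Pre_
        | some cur => PySem.Chars.islower prev && PySem.Chars.isupper cur

-- loop body of A's fused for-loop over enumerate(positions); state = (score, consecutive_bonus)
def aStep (path_original : String) (file_name_start : Int) (positions : List Int) :
    Int × Int → Int × Int → Int × Int := fun st ip =>
  let score := if isBoundary path_original ip.2 then st.1 + 12 else st.1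
  let score := if file_name_start ≤ ip.2 then score + 5 else score
  if 0 < ip.1 ∧ ip.2 = PySem.List.pyGetD positions (ip.1 - 1) 0 + 1 then
    (score + (st.2 + 8), st.2 + 8)
  else
    (score, 0)

def score_positions_py (path_lower : String) (path_original : String) (positions : List Int) (qlen : Int) : Int :=
  let file_name_start : Int := PySem.Str.rfind path_lower "/" + 1
  let st := (PySem.List.enumerate positions).foldl (aStep path_original file_name_start positions) (0, 0)
  let score := st.1
  let file_name := PySem.Str.slice path_lower (some file_name_start) none
  let firstChar := match positions with
    | [] => ("" : String)
    | p0 :: _ => PySem.Str.slice path_lower (some p0) (some (p0 + 1))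
  let score :=
    if PySem.Str.startswith file_name firstChar then
      if (PySem.List.slice positions none (some (min 3 (PySem.List.len positions)))).all
           (fun p => decide (file_name_start ≤ p)) then score + 30 else score
    else score
  score - PySem.Str.len path_lower + qlen * 3

-- ===== PORT B =====
-- Source B's inner while loop: scans back from index j while positions[j] == positions[j-1] + 1,
-- adding 1 to acc (= pairs) per step; j > 0 is the base case
def whileScan (positions : List Int) : Nat → Int → Int
  | 0, acc => acc
  | j + 1, acc =>
    if PySem.List.pyGetD positions ((j : Int) + 1) 0 = PySem.List.pyGetD positions (j : Int) 0 + 1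
    then whileScan positions j (acc + 1) else acc

def score_positions_py_alt (path_lower : String) (path_original : String) (positions : List Int) (qlen : Int) : Int :=
  let file_name_start : Int := PySem.Str.rfind path_lower "/" + 1
  let firstChar := match positions with
    | [] => ("" : String)
    | p0 :: _ => PySem.Str.slice path_lower (some p0) (some (p0 + 1))
  let score : Int :=
    if PySem.Str.startswith (PySem.Str.slice path_lower (some file_name_start) none) firstChar
        ∧ (PySem.List.slice positions none (some 3)).all (fun p => decide (file_name_start ≤ p))
    then 30 else 0
  let score := score + positions.foldl
    (fun acc p => acc + ((if isBoundary path_original p then 12 else 0)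
                          + (if file_name_start ≤ p then 5 else 0))) 0
  let pairs := (List.range positions.length).foldl (fun acc i => whileScan positions i acc) 0
  let score := score + 8 * pairs
  score - PySem.Str.len path_lower + qlen * 3

-- ===== PRECONDITION & SPEC =====
-- Pre_ excludes exactly the inputs on which Python's _is_boundary raises IndexError: a position whose
-- required character lookups (path[p-1], and path[p] when path[p-1] is not a boundary char) fall
-- outside the string under Python's index rules.
def Pre_score_positions_py (path_lower : String) (path_original : String) (positions : List Int) (qlen : Int) : Prop :=
  ∀ p ∈ positions, p = 0 ∨
    (PySem.Raise.InRange path_original.toList.length (p - 1) ∧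
      ((PySem.Str.pyGet? path_original (p - 1)).any isBoundaryChar = true ∨
        PySem.Raise.InRange path_original.toList.length p))
instance (path_lower : String) (path_original : String) (positions : List Int) (qlen : Int) : Decidable (Pre_score_positions_py path_lower path_original positions qlen) := by unfold Pre_score_positions_py; infer_instance

def pvWitness_score_positions_py : String × String × List Int × Int := ("a/b", "a/B", [0, 2], 1)

def Spec_score_positions_py (path_lower : String) (path_original : String) (positions : List Int) (qlen : Int) (out : Int) : Prop := out = score_positions_py_alt path_lower path_original positions qlen
instance (path_lower : String) (path_original : String) (positions : List Int) (qlen : Int) (out : Int) : Decidable (Spec_score_positions_py path_lower path_original positions qlen out) := by unfold Spec_score_positions_py; infer_instance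

-- ===== CLAIM (what is proved, stated in full; the proofs are below) =====
def Claim_equal_score_positions_py : Prop := ∀ (path_lower : String) (path_original : String) (positions : List Int) (qlen : Int), Dom_score_positions_py path_lower path_original positions qlen → Pre_score_positions_py path_lower path_original positions qlen → Spec_score_positions_py path_lower path_original positions qlen (score_positions_py path_lower path_original positions qlen)

-- ===== LEMMAS AND PROOFS =====

-- chain length ending at index i: c 0 = 0; c (j+1) = c j + 1 if positions[j+1] = positions[j]+1 else 0
def cChain (positions : List Int) : Nat → Int
  | 0 => 0
  | j + 1 =>
    if PySem.List.pyGetD positions ((j : Int) + 1) 0 = PySem.List.pyGetD positions (j : Int) 0 + 1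
    then cChain positions j + 1 else 0

lemma whileScan_eq (positions : List Int) :
    ∀ (j : Nat) (acc : Int), whileScan positions j acc = acc + cChain positions j := by
  intro j
  induction j with
  | zero => intro acc; simp [whileScan, cChain]
  | succ j ih =>
    intro acc
    simp only [whileScan, cChain]
    split_ifs with h
    · rw [ih]; ring
    · ring

lemma range_fold_whileScan (positions : List Int) :
    ∀ (n : Nat) (a : Int),
    (List.range n).foldl (fun acc i => whileScan positions i acc) a
      = a + ((List.range n).map (cChain positions)).sum := by
  intro n
  induction n with
  | zero => intro a; simp
  | succ n ih =>
    intro a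
    rw [List.range_succ, List.foldl_append, List.map_append, List.sum_append, ih]
    simp [whileScan_eq]
    ring

-- index-based structural form of A's fused loop
def aIdx (po : String) (fns : Int) (positions : List Int) : List Int → Int → Int × Int → Int × Int
  | [], _, st => st
  | p :: rest, i, st =>
    let s1 := if isBoundary po p then st.1 + 12 else st.1
    let s2 := if fns ≤ p then s1 + 5 else s1
    if 0 < i ∧ p = PySem.List.pyGetD positions (i - 1) 0 + 1 then
      aIdx po fns positions rest (i + 1) (s2 + (st.2 + 8), st.2 + 8)
    else
      aIdx po fns positions rest (i + 1) (s2, 0)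

lemma foldl_enum_eq_aIdx (po : String) (fns : Int) (positions : List Int) :
    ∀ (suf : List Int) (i : Int) (st : Int × Int),
    (PySem.List.enumerate suf i).foldl (aStep po fns positions) st
      = aIdx po fns positions suf i st := by
  intro suf
  induction suf with
  | nil => intro i st; simp [PySem.List.enumerate, aIdx]
  | cons p rest ih =>
    intro i st
    rw [PySem.List.enumerate_cons, List.foldl_cons]
    simp only [aIdx, aStep]
    split_ifs <;> exact ih _ _

-- weight of one position (boundary + region points)
def wgt (po : String) (fns : Int) (p : Int) : Int :=
  (if isBoundary po p then 12 else 0) + (if fns ≤ p then 5 else 0)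

-- A's loop equals the weight sum plus 8 × the chain-length sum over the remaining indices
lemma aIdx_eq (po : String) (fns : Int) (positions : List Int) :
    ∀ (suf : List Int) (i : Nat), positions.drop i = suf →
    ∀ (score cb : Int), cb = 8 * cChain positions (i - 1) →
    (aIdx po fns positions suf (i : Int) (score, cb)).1
      = score + (suf.map (wgt po fns)).sum
        + 8 * ((List.range' i suf.length).map (cChain positions)).sum := by
  intro suf
  induction suf with
  | nil => intro i _ score cb _; simp [aIdx]
  | cons p rest ih =>
    intro i hdrop score cb hcb
    have hip : positions[i]? = some p := by
      rw [← List.head?_drop, hdrop]; rfl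
    have hget : PySem.List.pyGetD positions (i : Int) 0 = p := by
      rw [PySem.List.pyGetD_natCast, List.getD_eq_getElem?_getD, hip]; rfl
    have hrest : positions.drop (i + 1) = rest := by
      rw [← List.drop_drop, hdrop]; rfl
    simp only [aIdx]
    match i with
    | 0 =>
      have hcond : ¬ (0 < (0:Int) ∧ p = PySem.List.pyGetD positions ((0:Int) - 1) 0 + 1) := by
        simp
      rw [if_neg (by exact_mod_cast hcond)]
      rw [show ((0:Nat):Int) + 1 = ((1:Nat):Int) by norm_num]
      rw [ih 1 hrest _ 0 (by simp [cChain])]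
      have hc0 : cChain positions 0 = 0 := rfl
      simp only [List.length_cons, List.range'_succ, List.map_cons, List.sum_cons,
        List.map_cons, List.sum_cons, hc0, wgt]
      split_ifs <;> ring
    | j + 1 =>
      have hi1 : ((j + 1 : Nat) : Int) - 1 = (j : Nat) := by push_cast; ring
      have hcond : (0 < ((j + 1 : Nat) : Int) ∧
          p = PySem.List.pyGetD positions (((j + 1 : Nat) : Int) - 1) 0 + 1)
          ↔ (PySem.List.pyGetD positions ((j : Int) + 1) 0
              = PySem.List.pyGetD positions (j : Int) 0 + 1) := by
        rw [hi1]
        constructor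
        · intro ⟨_, h2⟩
          rw [show ((j : Int) + 1) = ((j + 1 : Nat) : Int) by push_cast; ring, hget, h2]
        · intro h
          refine ⟨by positivity, ?_⟩
          rw [← hget, show ((j + 1 : Nat) : Int) = ((j : Int) + 1) by push_cast; ring, h]
      have hsucc : ((j + 1 : Nat) : Int) + 1 = ((j + 2 : Nat) : Int) := by push_cast; ring
      have hcsucc : cChain positions (j + 1)
          = if PySem.List.pyGetD positions ((j : Int) + 1) 0
              = PySem.List.pyGetD positions (j : Int) 0 + 1
            then cChain positions j + 1 else 0 := rfl
      by_cases h : PySem.List.pyGetD positions ((j : Int) + 1) 0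
          = PySem.List.pyGetD positions (j : Int) 0 + 1
      · have hnew : cb + 8 = 8 * cChain positions (j + 1) := by
          rw [hcsucc, if_pos h, hcb]; simp only [Nat.add_sub_cancel]; ring
        rw [if_pos (hcond.mpr h), hsucc]
        rw [ih (j + 2) hrest _ _ (by exact hnew)]
        rw [hnew]
        simp only [List.length_cons, List.range'_succ, List.map_cons, List.sum_cons, wgt]
        split_ifs <;> ring
      · rw [if_neg (by rw [hcond]; exact h), hsucc]
        have hc : cChain positions (j + 1) = 0 := by rw [hcsucc, if_neg h]
        rw [ih (j + 2) hrest _ 0 (by rw [show j + 2 - 1 = j + 1 from rfl, hc]; ring)]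
        simp only [List.length_cons, List.range'_succ, List.map_cons, List.sum_cons, hc, wgt]
        split_ifs <;> ring

-- positions[:min(3, len(positions))] = positions[:3]
lemma slice_min3 (xs : List Int) :
    PySem.List.slice xs none (some (min 3 (PySem.List.len xs)))
      = PySem.List.slice xs none (some 3) := by
  have h0 : (0:Int) ≤ min 3 (PySem.List.len xs) := by
    simp [PySem.List.len_eq]
  rw [PySem.List.slice_to _ h0, PySem.List.slice_to _ (by norm_num)]
  simp only [PySem.List.len_eq]
  rcases le_or_gt (3:Int) (xs.length:Int) with h | h
  · rw [min_eq_left h]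
  · rw [min_eq_right (le_of_lt h)]
    rw [List.take_of_length_le (by simp), List.take_of_length_le (by omega)]

-- ===== VERDICT (by name: the statement is the Claim_ definition above) =====
theorem score_positions_py_spec : Claim_equal_score_positions_py := by
  intro pl po positions qlen _hdom _hpre
  unfold Spec_score_positions_py score_positions_py score_positions_py_alt
  have hb := foldl_enum_eq_aIdx po (PySem.Str.rfind pl "/" + 1) positions positions 0 (0, 0)
  have ha := aIdx_eq po (PySem.Str.rfind pl "/" + 1) positions positions 0 rfl 0 0 (by simp [cChain])
  rw [show ((0:Nat):Int) = (0:Int) from rfl] at ha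
  have hw : positions.foldl
      (fun acc p => acc + ((if isBoundary po p then 12 else 0)
        + (if PySem.Str.rfind pl "/" + 1 ≤ p then 5 else 0))) 0
      = (positions.map (wgt po (PySem.Str.rfind pl "/" + 1))).sum := by
    rw [PySem.List.foldl_add]; simp only [zero_add]; rfl
  have hr : (List.range positions.length).foldl
      (fun acc i => whileScan positions i acc) 0
      = ((List.range' 0 positions.length).map (cChain positions)).sum := by
    rw [range_fold_whileScan, List.range_eq_range']; ring
  simp only [hb, ha, slice_min3, hw, hr, ite_and]
  split_ifs <;> ring
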